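-- pv_equiv track=rewrite | github.com/1-0Clarko/Maze_like_a_diffusion_algorithm | Labirinto 1.0/Rules.py | check_valid_move
-- ===== SOURCE A (Python) =====
-- condition_container = [
--     {(-1, 1): 0, (0, 1): 0, (1, 1): 0, (-1, 0): 1, (1, 0): 1},
--     {(0, 1): 1, (0, -1): 1, (1, -1): 0, (1, 1): 0},
--     {(-1, 1): 0, (0, 1): 0, (1, 1): 0},
--     {(1, -1): 0, (1, 0): 0, (1, 1): 0}
-- ]
--
-- def check_valid_move(neighbors, move_number, direction):
--     num_checks = 0
--     dir_x, dir_y = direction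
--     for x in range(-1, 2):
--         for y in range(-1, 2):
--             if (x, y) in condition_container[move_number]:
--                 oriented_x = -x if dir_x else x
--                 oriented_y = -y if dir_y else y
--                 if neighbors[oriented_x][oriented_y] == condition_container[move_number][x, y]:
--                     num_checks += 1
--                     if num_checks == len(condition_container[move_number]):
--                         return True
--     return False
-- ===== SOURCE B (Python) =====
-- def check_valid_move(neighbors, move_number, direction):
--     dx, dy = direction
--     def at(x, y):
--         return neighbors[-x if dx else x][-y if dy else y]
--     checks = [
--         lambda: at(-1, 1) == 0 and at(0, 1) == 0 and at(1, 1) == 0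
--                 and at(-1, 0) == 1 and at(1, 0) == 1,
--         lambda: at(0, 1) == 1 and at(0, -1) == 1 and at(1, -1) == 0 and at(1, 1) == 0,
--         lambda: at(-1, 1) == 0 and at(0, 1) == 0 and at(1, 1) == 0,
--         lambda: at(1, -1) == 0 and at(1, 0) == 0 and at(1, 1) == 0,
--     ]
--     return checks[move_number]()
-- ===== Notes on version B (the rewrite author's own statement) =====
-- stated objective: simpler
-- what changed: B drops the condition dicts, the 3x3 grid scan, the membership test and the num_checks counter entirely: each move's rule is written out as an explicit conjunction of oriented neighbor-cell comparisons, selected by indexing a 4-entry table of checks.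
import Mathlib
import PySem

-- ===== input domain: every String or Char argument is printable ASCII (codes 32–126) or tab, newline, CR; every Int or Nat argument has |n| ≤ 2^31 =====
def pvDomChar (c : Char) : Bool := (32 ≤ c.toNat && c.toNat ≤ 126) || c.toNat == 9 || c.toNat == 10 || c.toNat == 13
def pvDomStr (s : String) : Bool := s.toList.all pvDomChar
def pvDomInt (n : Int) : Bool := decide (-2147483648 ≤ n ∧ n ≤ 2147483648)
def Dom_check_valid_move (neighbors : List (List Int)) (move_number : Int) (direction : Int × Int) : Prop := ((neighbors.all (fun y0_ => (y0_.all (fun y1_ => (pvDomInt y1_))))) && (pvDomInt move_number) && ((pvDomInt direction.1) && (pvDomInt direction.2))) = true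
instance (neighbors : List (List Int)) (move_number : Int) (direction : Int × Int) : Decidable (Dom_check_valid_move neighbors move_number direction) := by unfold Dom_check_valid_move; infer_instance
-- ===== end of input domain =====

-- B drops the condition dicts, the 3×3 grid scan and the num_checks counter: each
-- move's rule is an explicit conjunction of oriented neighbor comparisons, picked
-- from a 4-entry table (objective: simpler).

-- ===== PORT A =====
-- the module-level constant condition_container used by A
def c0 : PySem.Dict (Int × Int) Int := PySem.Dict.mk [((-1, 1), 0), ((0, 1), 0), ((1, 1), 0), ((-1, 0), 1), ((1, 0), 1)]
def c1 : PySem.Dict (Int × Int) Int := PySem.Dict.mk [((0, 1), 1), ((0, -1), 1), ((1, -1), 0), ((1, 1), 0)]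
def c2 : PySem.Dict (Int × Int) Int := PySem.Dict.mk [((-1, 1), 0), ((0, 1), 0), ((1, 1), 0)]
def c3 : PySem.Dict (Int × Int) Int := PySem.Dict.mk [((1, -1), 0), ((1, 0), 0), ((1, 1), 0)]
def cc : List (PySem.Dict (Int × Int) Int) := [c0, c1, c2, c3]

-- A's nested 'for x in range(-1,2): for y in range(-1,2)' loop with the num_checks
-- accumulator and the early 'return True'; an out-of-range neighbor access (IndexError
-- in Python) is excluded by Pre_, so the none case of the lookup (treated as mismatch)
-- is never hit on admitted inputs.
def aGo (neighbors : List (List Int)) (dx dy : Int) (cond : PySem.Dict (Int × Int) Int) :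
    List (Int × Int) → Int → Bool
  | [], _ => false
  | (x, y) :: rest, numChecks =>
    match cond.get? (x, y) with
    | some v =>
      if ((PySem.List.pyGet? neighbors (if dx ≠ 0 then -x else x)).bind
            (fun row => PySem.List.pyGet? row (if dy ≠ 0 then -y else y))) = some v then
        if numChecks + 1 = cond.size then true
        else aGo neighbors dx dy cond rest (numChecks + 1)
      else aGo neighbors dx dy cond rest numChecks
    | none => aGo neighbors dx dy cond rest numChecks

def check_valid_move (neighbors : List (List Int)) (move_number : Int) (direction : Int × Int) : Bool :=
  match PySem.List.pyGet? cc move_number with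
  | none => false  -- Python raises IndexError here; excluded by Pre_
  | some cond =>
    aGo neighbors direction.1 direction.2 cond
      ((PySem.List.pyRange (-1) 2 1).flatMap (fun x => (PySem.List.pyRange (-1) 2 1).map (fun y => (x, y)))) 0

-- ===== PORT B =====
-- Source B's helper at(x, y): the oriented neighbor cell; none = IndexError, excluded by Pre_
def bAt (neighbors : List (List Int)) (dx dy x y : Int) : Option Int :=
  (PySem.List.pyGet? neighbors (if dx ≠ 0 then -x else x)).bind
    (fun row => PySem.List.pyGet? row (if dy ≠ 0 then -y else y))

def check_valid_move_alt (neighbors : List (List Int)) (move_number : Int) (direction : Int × Int) : Bool :=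
  match PySem.List.pyGet?
    [ (bAt neighbors direction.1 direction.2 (-1) 1 == some 0
        && bAt neighbors direction.1 direction.2 0 1 == some 0
        && bAt neighbors direction.1 direction.2 1 1 == some 0
        && bAt neighbors direction.1 direction.2 (-1) 0 == some 1
        && bAt neighbors direction.1 direction.2 1 0 == some 1),
      (bAt neighbors direction.1 direction.2 0 1 == some 1
        && bAt neighbors direction.1 direction.2 0 (-1) == some 1
        && bAt neighbors direction.1 direction.2 1 (-1) == some 0
        && bAt neighbors direction.1 direction.2 1 1 == some 0),
      (bAt neighbors direction.1 direction.2 (-1) 1 == some 0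
        && bAt neighbors direction.1 direction.2 0 1 == some 0
        && bAt neighbors direction.1 direction.2 1 1 == some 0),
      (bAt neighbors direction.1 direction.2 1 (-1) == some 0
        && bAt neighbors direction.1 direction.2 1 0 == some 0
        && bAt neighbors direction.1 direction.2 1 1 == some 0) ] move_number with
  | none => false  -- Python raises IndexError here; excluded by Pre_
  | some b => b

-- ===== PRECONDITION & SPEC =====
-- Pre_ excludes exactly the inputs on which Python A raises IndexError: a move_number
-- outside the container's index range, or a constrained neighbor cell whose oriented
-- index is out of range of the neighbors grid (A visits every constrained cell, so any
-- such cell makes it raise).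
def Pre_check_valid_move (neighbors : List (List Int)) (move_number : Int) (direction : Int × Int) : Prop :=
  (-4 ≤ move_number ∧ move_number < 4) ∧
  ∀ kv ∈ ((PySem.List.pyGet? cc move_number).getD PySem.Dict.empty).items,
    ((PySem.List.pyGet? neighbors (if direction.1 ≠ 0 then -kv.1.1 else kv.1.1)).bind
      (fun row => PySem.List.pyGet? row (if direction.2 ≠ 0 then -kv.1.2 else kv.1.2))).isSome
instance (neighbors : List (List Int)) (move_number : Int) (direction : Int × Int) : Decidable (Pre_check_valid_move neighbors move_number direction) := by unfold Pre_check_valid_move; infer_instance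

def pvWitness_check_valid_move : List (List Int) × Int × (Int × Int) :=
  ([[0, 0, 0], [1, 0, 1], [0, 0, 0]], 2, (0, 0))

def Spec_check_valid_move (neighbors : List (List Int)) (move_number : Int) (direction : Int × Int) (out : Bool) : Prop := out = check_valid_move_alt neighbors move_number direction
instance (neighbors : List (List Int)) (move_number : Int) (direction : Int × Int) (out : Bool) : Decidable (Spec_check_valid_move neighbors move_number direction out) := by unfold Spec_check_valid_move; infer_instance

-- ===== CLAIM (what is proved, stated in full; the proofs are below) =====
def Claim_equal_check_valid_move : Prop := ∀ (neighbors : List (List Int)) (move_number : Int) (direction : Int × Int), Dom_check_valid_move neighbors move_number direction → Pre_check_valid_move neighbors move_number direction → Spec_check_valid_move neighbors move_number direction (check_valid_move neighbors move_number direction)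

-- ===== LEMMAS AND PROOFS =====

-- Bool-level form of == on Option Int, used to align B's == with A's decided =
theorem beqOptInt (a b : Option Int) : (a == b) = decide (a = b) := by
  by_cases h : a = b <;> simp [h]

-- indexing a literal 4-element list at each admissible Python index (elements symbolic)
theorem pyGet4 {α : Type} (a b c d : α) :
    (PySem.List.pyGet? [a, b, c, d] (-4) = some a) ∧ (PySem.List.pyGet? [a, b, c, d] (-3) = some b) ∧
    (PySem.List.pyGet? [a, b, c, d] (-2) = some c) ∧ (PySem.List.pyGet? [a, b, c, d] (-1) = some d) ∧
    (PySem.List.pyGet? [a, b, c, d] 0 = some a) ∧ (PySem.List.pyGet? [a, b, c, d] 1 = some b) ∧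
    (PySem.List.pyGet? [a, b, c, d] 2 = some c) ∧ (PySem.List.pyGet? [a, b, c, d] 3 = some d) := by
  refine ⟨?_, ?_, ?_, ?_, ?_, ?_, ?_, ?_⟩ <;> rfl

-- for each admissible move_number both sides reduce (after fixing the looked-up dict /
-- check and unrolling A's scan and B's conjunction) to the same boolean combination of
-- the neighbor-access equations, up to reordering of the conjuncts.
set_option maxHeartbeats 2000000 in
theorem cvm_case (n : List (List Int)) (d1 d2 : Int) (m : Int) (h1 : -4 ≤ m) (h2 : m < 4) :
    check_valid_move n m (d1, d2) = check_valid_move_alt n m (d1, d2) := by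
  unfold check_valid_move check_valid_move_alt
  rw [show PySem.List.pyRange (-1) 2 1 = [-1, 0, 1] from by decide]
  rw [show (cc : List (PySem.Dict (Int × Int) Int)) = [c0, c1, c2, c3] from rfl]
  interval_cases m <;>
  · first
      | rw [(pyGet4 c0 c1 c2 c3).1, (pyGet4 _ _ _ _).1]
      | rw [(pyGet4 c0 c1 c2 c3).2.1, (pyGet4 _ _ _ _).2.1]
      | rw [(pyGet4 c0 c1 c2 c3).2.2.1, (pyGet4 _ _ _ _).2.2.1]
      | rw [(pyGet4 c0 c1 c2 c3).2.2.2.1, (pyGet4 _ _ _ _).2.2.2.1]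
      | rw [(pyGet4 c0 c1 c2 c3).2.2.2.2.1, (pyGet4 _ _ _ _).2.2.2.2.1]
      | rw [(pyGet4 c0 c1 c2 c3).2.2.2.2.2.1, (pyGet4 _ _ _ _).2.2.2.2.2.1]
      | rw [(pyGet4 c0 c1 c2 c3).2.2.2.2.2.2.1, (pyGet4 _ _ _ _).2.2.2.2.2.2.1]
      | rw [(pyGet4 c0 c1 c2 c3).2.2.2.2.2.2.2, (pyGet4 _ _ _ _).2.2.2.2.2.2.2]
    norm_num [c0, c1, c2, c3, aGo, bAt, PySem.Dict.get?, PySem.Dict.size, PySem.Dict.items, List.lookup]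
    all_goals (simp only [beqOptInt]; ac_rfl)

-- ===== VERDICT (by name: the statement is the Claim_ definition above) =====
theorem check_valid_move_spec : Claim_equal_check_valid_move := by
  intro n m d _ hpre
  obtain ⟨⟨h1, h2⟩, -⟩ := hpre
  obtain ⟨d1, d2⟩ := d
  exact cvm_case n d1 d2 m h1 h2
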